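-- pv_equiv track=rewrite | github.com/harveylabis/GTx_CS1301 | codes/CHAPTER_4/Chapter_4.5_Dictionaries/Extra_Course/ArithmeticFormulaCheck.py | side_validator
-- ===== SOURCE A (Python) =====
-- def side_validator(side):
--     operators = ('+', '*', '-', '/', '=')
--     digits = ('0', '1', '2' ,'3', '4', '5', '6', '7', '8', '9')
--     if len(side) == 0:
--         return False
--     for i in range(len(side)):
--         if i%2==0:
--             if not side[i] in digits:
--                 return False
--         else:
--             if not side[i] in operators:
--                 return False
--
--     return True
-- ===== SOURCE B (Python) =====
-- def side_validator(side):
--     if len(side) == 0: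
--         return False
--     return (all(c in '0123456789' for c in side[0::2])
--             and all(c in '+*-/=' for c in side[1::2]))
-- ===== Notes on version B (the rewrite author's own statement) =====
-- stated objective: idiomatic
-- what changed: Replaces the single indexed loop with an i%2 parity branch by two separate strided passes: all() over the even-position slice against digits and over the odd-position slice against operators.
import Mathlib
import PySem

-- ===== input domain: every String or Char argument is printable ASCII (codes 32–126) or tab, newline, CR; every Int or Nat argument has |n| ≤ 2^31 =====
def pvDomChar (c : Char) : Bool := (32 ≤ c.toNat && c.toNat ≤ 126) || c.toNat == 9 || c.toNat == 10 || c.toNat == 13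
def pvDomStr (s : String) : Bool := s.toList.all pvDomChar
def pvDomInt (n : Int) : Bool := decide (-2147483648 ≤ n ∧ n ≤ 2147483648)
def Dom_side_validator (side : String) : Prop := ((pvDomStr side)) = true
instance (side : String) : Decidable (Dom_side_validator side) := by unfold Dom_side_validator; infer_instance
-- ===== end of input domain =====

-- B replaces A's single indexed loop with an i%2 parity branch by two strided passes
-- (even positions checked against digits, odd positions against operators); return value only.

-- ===== PORT A =====
def pvDigits : List Char := ['0','1','2','3','4','5','6','7','8','9']
def pvOps : List Char := ['+','*','-','/','=']

-- the `for i in range(len(side))` loop with early returns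
def pvLoopA (s : List Char) (i : Nat) : Bool :=
  if h : i < s.length then
    if i % 2 == 0 then
      if ¬ (pvDigits.contains s[i]) then false else pvLoopA s (i+1)
    else
      if ¬ (pvOps.contains s[i]) then false else pvLoopA s (i+1)
  else true
termination_by s.length - i

def side_validator (side : String) : Bool :=
  if side.toList.length == 0 then false
  else pvLoopA side.toList 0

-- ===== PORT B =====
-- side[0::2] : every second element starting at the head
def pvStride : List Char → List Char
  | [] => []
  | [a] => [a]
  | a :: _ :: r => a :: pvStride r

def side_validator_alt (side : String) : Bool :=
  if side.toList.length == 0 then false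
  else (pvStride side.toList).all (fun c => pvDigits.contains c)
    && (pvStride (side.toList.drop 1)).all (fun c => pvOps.contains c)

-- ===== PRECONDITION & SPEC =====
def Spec_side_validator (side : String) (out : Bool) : Prop := out = side_validator_alt side
instance (side : String) (out : Bool) : Decidable (Spec_side_validator side out) := by unfold Spec_side_validator; infer_instance

-- ===== CLAIM (what is proved, stated in full; the proofs are below) =====
def Claim_equal_side_validator : Prop := ∀ (side : String), Dom_side_validator side → Spec_side_validator side (side_validator side)

-- ===== LEMMAS AND PROOFS =====
-- alternating check with a "digit position" flag
def pvAlt : List Char → Bool → Bool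
  | [], _ => true
  | c :: r, b => (if b then pvDigits.contains c else pvOps.contains c) && pvAlt r (!b)

theorem pvFlip (i : Nat) : (!decide (i % 2 = 0)) = decide ((i+1) % 2 = 0) := by
  by_cases h : i % 2 = 0
  · have h' : ¬ ((i+1) % 2 = 0) := by omega
    simp [h, h']
  · have h' : (i+1) % 2 = 0 := by omega
    simp [h, h']

theorem pvLoopA_eq_alt (s : List Char) (i : Nat) :
    pvLoopA s i = pvAlt (s.drop i) (decide (i % 2 = 0)) := by
  induction i using pvLoopA.induct (s := s) with
  | case1 x h hp hc =>
    rw [pvLoopA, List.drop_eq_getElem_cons h, pvAlt]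
    have hb : decide (x % 2 = 0) = true := by simpa using hp
    have hc' : s[x] ∉ pvDigits := by simpa using hc
    simp [h, hp, hb, hc']
  | case2 x h hp hc ih =>
    rw [pvLoopA, List.drop_eq_getElem_cons h, pvAlt]
    have hb : decide (x % 2 = 0) = true := by simpa using hp
    have hc' : s[x] ∈ pvDigits := by simpa using hc
    rw [ih, ← pvFlip]
    simp [h, hp, hb, hc']
  | case3 x h hp hc =>
    rw [pvLoopA, List.drop_eq_getElem_cons h, pvAlt]
    have hb : decide (x % 2 = 0) = false := by simpa using hp
    have hc' : s[x] ∉ pvOps := by simpa using hc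
    simp [h, hp, hb, hc']
  | case4 x h hp hc ih =>
    rw [pvLoopA, List.drop_eq_getElem_cons h, pvAlt]
    have hb : decide (x % 2 = 0) = false := by simpa using hp
    have hc' : s[x] ∈ pvOps := by simpa using hc
    rw [ih, ← pvFlip]
    simp [h, hp, hb, hc']
  | case5 x h =>
    rw [pvLoopA]
    have hd : s.drop x = [] := List.drop_eq_nil_of_le (by omega)
    simp [hd, pvAlt, h]

theorem pvStride_cons (b : Char) (r : List Char) :
    pvStride (b :: r) = b :: pvStride (r.drop 1) := by
  cases r <;> simp [pvStride]

theorem pvAlt_eq_stride (l : List Char) :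
    pvAlt l true = ((pvStride l).all (fun c => pvDigits.contains c)
      && (pvStride (l.drop 1)).all (fun c => pvOps.contains c)) := by
  induction l using pvStride.induct with
  | case1 => simp [pvAlt, pvStride]
  | case2 a => simp [pvAlt, pvStride]
  | case3 a b r ih =>
    have e : pvAlt (a :: b :: r) true
        = (pvDigits.contains a && (pvOps.contains b && pvAlt r true)) := by
      simp [pvAlt]
    rw [e, ih]
    simp only [pvStride_cons, List.drop_succ_cons, List.drop_zero, List.all_cons]
    cases pvDigits.contains a <;> cases pvOps.contains b <;> simp

-- ===== VERDICT (by name: the statement is the Claim_ definition above) =====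
theorem side_validator_spec : Claim_equal_side_validator := by
  intro side _
  unfold Spec_side_validator side_validator side_validator_alt
  cases h : (side.toList.length == 0) with
  | true => rfl
  | false =>
    rw [if_neg Bool.false_ne_true, if_neg Bool.false_ne_true]
    rw [pvLoopA_eq_alt]
    simp only [List.drop_zero, Nat.zero_mod, decide_true]
    rw [pvAlt_eq_stride]
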